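-- pv_equiv track=rewrite | github.com/ribesstefano/GPU-accelerated-Finite-Element-Method-using-Python-and-CUDA | test/test_run_simulation.py | group_vertexes
-- ===== SOURCE A (Python) =====
-- from collections import defaultdict
--
-- def create_adjacency_matrix(connections):
--     matrix = defaultdict(dict)
--     for a, b in connections:
--         matrix[a][b] = 1
--         matrix[b][a] = 1
--     return matrix
--
-- def is_connected_to_all(vertex, group, matrix):
--     for v in group:
--         if vertex != v and vertex not in matrix[v]:
--             return False
--     return True
--
-- def group_vertexes(vertixes):
--     matrix = create_adjacency_matrix(vertixes)
--     groups = []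
--     current_group = set()
--     for vertex in matrix.keys():
--         if is_connected_to_all(vertex, current_group, matrix):
--             current_group.add(vertex)
--         else:
--             groups.append(current_group)
--             current_group = {vertex}
--     groups.append(current_group)
--     return groups
-- ===== SOURCE B (Python) =====
-- def group_vertexes(vertixes):
--     adj = {}
--     for a, b in vertixes:
--         adj.setdefault(a, {})[b] = 1
--         adj.setdefault(b, {})[a] = 1
--     groups = []
--     current = []          # members of the current clique, in discovery order
--     cand = None           # None = empty group; else running intersection of members' neighbor sets
--     for v in adj:
--         nv = set(adj[v])
--         if cand is None:
--             current.append(v)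
--             cand = nv
--         elif v in cand:
--             current.append(v)
--             cand = cand & nv
--         else:
--             groups.append(set(current))
--             current = [v]
--             cand = nv
--     groups.append(set(current))
--     return groups
-- ===== Notes on version B (the rewrite author's own statement) =====
-- stated objective: alternative
-- what changed: Instead of rescanning every member of the current group for each new vertex (is_connected_to_all), B maintains a running intersection of the group members' neighbor sets and admits a vertex by a single membership test in that set.
import Mathlib
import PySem

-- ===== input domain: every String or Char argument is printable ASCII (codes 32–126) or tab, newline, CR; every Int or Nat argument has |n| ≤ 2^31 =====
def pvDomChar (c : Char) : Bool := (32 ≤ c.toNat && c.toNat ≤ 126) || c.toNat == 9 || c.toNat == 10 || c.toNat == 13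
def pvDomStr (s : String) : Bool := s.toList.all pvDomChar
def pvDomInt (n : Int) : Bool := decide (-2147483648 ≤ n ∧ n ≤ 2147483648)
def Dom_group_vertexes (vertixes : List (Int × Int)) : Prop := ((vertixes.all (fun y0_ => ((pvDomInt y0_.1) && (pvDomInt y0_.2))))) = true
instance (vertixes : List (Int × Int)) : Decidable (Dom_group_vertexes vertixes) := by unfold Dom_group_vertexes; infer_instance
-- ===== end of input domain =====

-- B replaces the per-vertex rescan of the whole current group (is_connected_to_all) by a
-- running intersection of the members' neighbor sets, checked by one membership test (objective: alternative).

-- ===== PORT A =====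
-- matrix[a][b] = 1 on a defaultdict(dict)
def create_adjacency_matrix (connections : List (Int × Int)) : PySem.Dict Int (PySem.Dict Int Int) :=
  connections.foldl
    (fun matrix p =>
      let m1 := matrix.insert p.1 ((matrix.getD p.1 PySem.Dict.empty).insert p.2 1)
      m1.insert p.2 ((m1.getD p.2 PySem.Dict.empty).insert p.1 1))
    PySem.Dict.empty

def is_connected_to_all (vertex : Int) (group : List Int)
    (matrix : PySem.Dict Int (PySem.Dict Int Int)) : Bool :=
  match group with
  | [] => true
  | v :: rest =>
    if vertex ≠ v ∧ (matrix.getD v PySem.Dict.empty).contains vertex = false then false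
    else is_connected_to_all vertex rest matrix

def group_vertexes (vertixes : List (Int × Int)) : List (List Int) :=
  let matrix := create_adjacency_matrix vertixes
  let st := matrix.keys.foldl
    (fun (st : List (List Int) × List Int) vertex =>
      if is_connected_to_all vertex st.2 matrix then (st.1, PySem.Set.add st.2 vertex)
      else (st.1 ++ [st.2], [vertex]))
    ([], [])
  st.1 ++ [st.2]

-- ===== PORT B =====
-- adj.setdefault(a, {})[b] = 1
def buildAdj (vertixes : List (Int × Int)) : PySem.Dict Int (PySem.Dict Int Int) :=
  vertixes.foldl
    (fun adj p =>
      let a1 := (adj.setdefault p.1 PySem.Dict.empty).modify p.1 PySem.Dict.empty (fun inner => inner.insert p.2 1)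
      (a1.setdefault p.2 PySem.Dict.empty).modify p.2 PySem.Dict.empty (fun inner => inner.insert p.1 1))
    PySem.Dict.empty

-- state: (groups, current, cand); cand = none means the current group is empty
def group_vertexes_alt (vertixes : List (Int × Int)) : List (List Int) :=
  let adj := buildAdj vertixes
  let st := adj.keys.foldl
    (fun (st : List (List Int) × List Int × Option (List Int)) v =>
      let nv : PySem.Set Int := PySem.Set.ofList (adj.getD v PySem.Dict.empty).keys
      match st.2.2 with
      | none => (st.1, st.2.1 ++ [v], some nv)
      | some c =>
        if v ∈ c then (st.1, st.2.1 ++ [v], some (PySem.Set.inter c nv))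
        else (st.1 ++ [PySem.Set.ofList st.2.1], [v], some nv))
    ([], [], none)
  st.1 ++ [PySem.Set.ofList st.2.1]

-- ===== PRECONDITION & SPEC =====
def Spec_group_vertexes (vertixes : List (Int × Int)) (out : List (List Int)) : Prop := out = group_vertexes_alt vertixes
instance (vertixes : List (Int × Int)) (out : List (List Int)) : Decidable (Spec_group_vertexes vertixes out) := by unfold Spec_group_vertexes; infer_instance

-- ===== CLAIM (what is proved, stated in full; the proofs are below) =====
def Claim_equal_group_vertexes : Prop := ∀ (vertixes : List (Int × Int)), Dom_group_vertexes vertixes → Spec_group_vertexes vertixes (group_vertexes vertixes)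

-- ===== LEMMAS AND PROOFS =====

-- the two adjacency builders agree
theorem setdefault_modify_eq (d : PySem.Dict Int (PySem.Dict Int Int)) (a b : Int) :
    (d.setdefault a PySem.Dict.empty).modify a PySem.Dict.empty (fun inner => inner.insert b 1)
      = d.insert a ((d.getD a PySem.Dict.empty).insert b 1) := by
  by_cases h : d.contains a = true
  · rw [PySem.Dict.setdefault_of_contains _ _ h]; rfl
  · rw [PySem.Dict.setdefault_of_not_contains _ _ (by simpa using h)]
    show (d.insert a _).insert a _ = _
    rw [PySem.Dict.getD_insert_self, PySem.Dict.insert_insert_self,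
        PySem.Dict.getD_of_not_contains _ _ (by simpa using h)]

theorem buildAdj_eq (vertixes : List (Int × Int)) :
    buildAdj vertixes = create_adjacency_matrix vertixes := by
  unfold buildAdj create_adjacency_matrix
  congr 1
  funext adj p
  simp only [setdefault_modify_eq]

theorem keys_nodup_foldl (l : List (Int × Int)) (d : PySem.Dict Int (PySem.Dict Int Int))
    (h : d.keys.Nodup) :
    (l.foldl
      (fun matrix p =>
        let m1 := matrix.insert p.1 ((matrix.getD p.1 PySem.Dict.empty).insert p.2 1)
        m1.insert p.2 ((m1.getD p.2 PySem.Dict.empty).insert p.1 1)) d).keys.Nodup := by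
  induction l generalizing d with
  | nil => exact h
  | cons p rest ih =>
    exact ih _ (PySem.Dict.nodup_keys_insert _ _ _ (PySem.Dict.nodup_keys_insert _ _ _ h))

theorem keys_nodup_create (vertixes : List (Int × Int)) :
    (create_adjacency_matrix vertixes).keys.Nodup := by
  unfold create_adjacency_matrix
  exact keys_nodup_foldl vertixes PySem.Dict.empty (by simp [PySem.Dict.keys_empty])

-- characterisation of A's inner scan
theorem is_connected_iff (vertex : Int) (group : List Int)
    (matrix : PySem.Dict Int (PySem.Dict Int Int)) :
    is_connected_to_all vertex group matrix = true ↔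
      ∀ v ∈ group, vertex = v ∨ (matrix.getD v PySem.Dict.empty).contains vertex = true := by
  induction group with
  | nil => simp [is_connected_to_all]
  | cons v rest ih =>
    simp only [is_connected_to_all]
    by_cases h : vertex ≠ v ∧ (matrix.getD v PySem.Dict.empty).contains vertex = false
    · rw [if_pos h]
      simp only [List.mem_cons]
      constructor
      · intro hF; cases hF
      · intro hall
        rcases hall v (Or.inl rfl) with h1 | h1
        · exact absurd h1 h.1
        · rw [h.2] at h1; cases h1
    · rw [if_neg h]
      have hv : vertex = v ∨ (matrix.getD v PySem.Dict.empty).contains vertex = true := by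
        by_cases he : vertex = v
        · exact Or.inl he
        · cases hb : (matrix.getD v PySem.Dict.empty).contains vertex
          · exact absurd ⟨he, hb⟩ h
          · exact Or.inr rfl
      rw [ih]
      constructor
      · intro hr x hx
        rcases List.mem_cons.mp hx with rfl | hx'
        · exact hv
        · exact hr x hx'
      · intro hall x hx; exact hall x (List.mem_cons_of_mem _ hx)

theorem set_add_of_not_mem (s : PySem.Set Int) (x : Int) (h : x ∉ s) :
    PySem.Set.add s x = s ++ [x] := by
  simp [PySem.Set.add, PySem.Set.contains, h]

-- proof-side names for the two fold bodies
def stepA (m : PySem.Dict Int (PySem.Dict Int Int))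
    (st : List (List Int) × List Int) (vertex : Int) : List (List Int) × List Int :=
  if is_connected_to_all vertex st.2 m then (st.1, PySem.Set.add st.2 vertex)
  else (st.1 ++ [st.2], [vertex])

def stepB (m : PySem.Dict Int (PySem.Dict Int Int))
    (st : List (List Int) × List Int × Option (List Int)) (v : Int) :
    List (List Int) × List Int × Option (List Int) :=
  let nv : PySem.Set Int := PySem.Set.ofList (m.getD v PySem.Dict.empty).keys
  match st.2.2 with
  | none => (st.1, st.2.1 ++ [v], some nv)
  | some c =>
    if v ∈ c then (st.1, st.2.1 ++ [v], some (PySem.Set.inter c nv))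
    else (st.1 ++ [PySem.Set.ofList st.2.1], [v], some nv)

-- main loop invariant
theorem loop_eq (m : PySem.Dict Int (PySem.Dict Int Int)) :
    ∀ (ks : List Int) (groups : List (List Int)) (cur : List Int) (cand : Option (List Int)),
      ks.Nodup → (∀ k ∈ ks, k ∉ cur) → cur.Nodup →
      (cand = none ↔ cur = []) →
      (∀ c, cand = some c → ∀ x, x ∈ c ↔ ∀ v ∈ cur, (m.getD v PySem.Dict.empty).contains x = true) →
      (let a := ks.foldl (stepA m) (groups, cur)
       let b := ks.foldl (stepB m) (groups, cur, cand)
       a.1 ++ [a.2] = b.1 ++ [PySem.Set.ofList b.2.1]) := by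
  intro ks
  induction ks with
  | nil =>
    intro groups cur cand _ _ hnd _ _
    simp [PySem.Set.ofList_eq_self_of_nodup _ hnd]
  | cons k rest ih =>
    intro groups cur cand hndks hmem hnd hnone hsome
    have hk_cur : k ∉ cur := hmem k (List.mem_cons_self ..)
    have hrest_nd : rest.Nodup := (List.nodup_cons.mp hndks).2
    have hk_rest : k ∉ rest := (List.nodup_cons.mp hndks).1
    simp only [List.foldl_cons]
    cases cand with
    | none =>
      have hcur : cur = [] := hnone.mp rfl
      subst hcur
      rw [show stepA m (groups, []) k = (groups, [k]) from rfl,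
          show stepB m (groups, [], none) k
              = (groups, [k], some (PySem.Set.ofList (m.getD k PySem.Dict.empty).keys)) from rfl]
      exact ih groups [k] (some (PySem.Set.ofList (m.getD k PySem.Dict.empty).keys))
        hrest_nd
        (by intro j hj hj2; simp only [List.mem_singleton] at hj2; subst hj2; exact hk_rest hj)
        (by simp)
        (by constructor <;> intro h <;> simp_all)
        (by
          rintro c hc x
          injection hc with hc; subst hc
          simp only [List.mem_singleton, forall_eq]
          rw [PySem.Set.mem_ofList, ← PySem.Dict.contains_iff_mem_keys])
    | some c =>
      have hconn_iff : is_connected_to_all k cur m = true ↔ k ∈ c := by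
        rw [is_connected_iff, hsome c rfl k]
        constructor
        · intro hall v hv
          rcases hall v hv with rfl | h1
          · exact absurd hv hk_cur
          · exact h1
        · intro hall v hv; exact Or.inr (hall v hv)
      by_cases hk : k ∈ c
      · rw [show stepA m (groups, cur) k = (groups, PySem.Set.add cur k) from by
              unfold stepA; rw [if_pos (hconn_iff.mpr hk)],
            set_add_of_not_mem cur k hk_cur,
            show stepB m (groups, cur, some c) k
                = (groups, cur ++ [k], some (PySem.Set.inter c (PySem.Set.ofList (m.getD k PySem.Dict.empty).keys))) from by
              unfold stepB; simp [hk]]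
        exact ih groups (cur ++ [k]) (some (PySem.Set.inter c (PySem.Set.ofList (m.getD k PySem.Dict.empty).keys)))
          hrest_nd
          (by
            intro j hj
            simp only [List.mem_append, List.mem_singleton]
            rintro (hjc | rfl)
            · exact hmem j (List.mem_cons_of_mem _ hj) hjc
            · exact hk_rest hj)
          (by
            rw [List.nodup_append]
            refine ⟨hnd, List.nodup_singleton k, ?_⟩
            intro a ha b hb
            have hbk : b = k := by simpa using hb
            intro hab
            rw [hab, hbk] at ha
            exact hk_cur ha)
          (by constructor <;> intro h <;> simp_all)
          (by
            rintro c' hc' x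
            injection hc' with hc'; subst hc'
            rw [PySem.Set.mem_inter]
            simp only [List.mem_append, List.mem_singleton]
            rw [hsome c rfl x, PySem.Set.mem_ofList, ← PySem.Dict.contains_iff_mem_keys]
            constructor
            · rintro ⟨h1, h2⟩ v (hv | rfl)
              · exact h1 v hv
              · exact h2
            · intro hall
              exact ⟨fun v hv => hall v (Or.inl hv), hall k (Or.inr rfl)⟩)
      · rw [show stepA m (groups, cur) k = (groups ++ [cur], [k]) from by
              unfold stepA; rw [if_neg (by rw [hconn_iff]; exact hk)],
            show stepB m (groups, cur, some c) k
                = (groups ++ [PySem.Set.ofList cur], [k], some (PySem.Set.ofList (m.getD k PySem.Dict.empty).keys)) from by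
              unfold stepB; simp [hk],
            PySem.Set.ofList_eq_self_of_nodup _ hnd]
        exact ih (groups ++ [cur]) [k] (some (PySem.Set.ofList (m.getD k PySem.Dict.empty).keys))
          hrest_nd
          (by intro j hj hj2; simp only [List.mem_singleton] at hj2; subst hj2; exact hk_rest hj)
          (by simp)
          (by constructor <;> intro h <;> simp_all)
          (by
            rintro c' hc' x
            injection hc' with hc'; subst hc'
            simp only [List.mem_singleton, forall_eq]
            rw [PySem.Set.mem_ofList, ← PySem.Dict.contains_iff_mem_keys])

-- ===== VERDICT (by name: the statement is the Claim_ definition above) =====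
theorem group_vertexes_spec : Claim_equal_group_vertexes := by
  intro vertixes _
  unfold Spec_group_vertexes group_vertexes group_vertexes_alt
  rw [buildAdj_eq]
  exact loop_eq _ _ [] [] none (keys_nodup_create vertixes) (by simp) (by simp)
    (by simp) (by simp)
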